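-- pv_equiv track=rewrite | github.com/CityU-MLO/AlphaBench | ffo/utils/utils.py | _build_forward_label_exprs
-- ===== SOURCE A (Python) =====
-- from typing import Any, Dict, Iterable, List, Optional, Sequence, Tuple
--
-- def _build_forward_label_exprs(forward_n: int) -> List[Tuple[str, str]]:
--     """
--     Build (name, qlib_expr) pairs for n consecutive forward daily returns.
--
--     Day k return = price change from close of day k-1 to close of day k (forward).
--       k=1: Ref($close,-1)/$close - 1
--       k=2: Ref($close,-2)/Ref($close,-1) - 1
--       ...
--       k=n: Ref($close,-n)/Ref($close,-(n-1)) - 1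
--
--     Args:
--         forward_n: Number of forward days (>=1).
--
--     Returns:
--         List of (label_name, qlib_expression) tuples.
--     """
--     labels = []
--     for k in range(1, forward_n + 1):
--         if k == 1:
--             expr = "Ref($close, -1)/$close - 1"
--         else:
--             expr = f"Ref($close, -{k})/Ref($close, -{k - 1}) - 1"
--         labels.append((f"RET_d{k}", expr))
--     return labels
-- ===== SOURCE B (Python) =====
-- def _build_forward_label_exprs(forward_n: int):
--     refs = ["$close"] + [f"Ref($close, -{i})" for i in range(1, forward_n + 1)]
--     return [(f"RET_d{k}", f"{cur}/{prev} - 1")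
--             for k, (prev, cur) in enumerate(zip(refs, refs[1:]), start=1)]
-- ===== Notes on version B (the rewrite author's own statement) =====
-- stated objective: simpler
-- what changed: Instead of a loop with a special branch for the first iteration, B builds the list of close-reference strings once and pairs consecutive entries with zip/enumerate, so no branch is needed.
import Mathlib
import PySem

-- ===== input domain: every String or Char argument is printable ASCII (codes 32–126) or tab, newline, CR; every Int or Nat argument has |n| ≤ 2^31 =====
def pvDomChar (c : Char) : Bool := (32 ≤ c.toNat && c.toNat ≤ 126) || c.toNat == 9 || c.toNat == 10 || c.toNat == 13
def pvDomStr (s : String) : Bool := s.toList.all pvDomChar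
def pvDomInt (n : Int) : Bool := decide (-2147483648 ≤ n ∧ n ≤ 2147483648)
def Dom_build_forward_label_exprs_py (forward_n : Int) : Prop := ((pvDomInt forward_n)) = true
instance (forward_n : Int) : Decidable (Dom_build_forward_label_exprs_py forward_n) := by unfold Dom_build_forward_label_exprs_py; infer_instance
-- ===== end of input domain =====

-- B replaces A's loop with its first-iteration special branch by building the close-reference list once
-- and pairing consecutive entries with zip/enumerate (objective: simpler; same return value).

-- ===== PORT A =====
def build_forward_label_exprs_py (forward_n : Int) : List (String × String) :=
  (PySem.List.pyRange 1 (forward_n + 1) 1).foldl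
    (fun labels k =>
      let expr : String :=
        if k == 1 then "Ref($close, -1)/$close - 1"
        else "Ref($close, -" ++ PySem.Int.toStr k ++ ")/Ref($close, -" ++ PySem.Int.toStr (k - 1) ++ ") - 1"
      labels ++ [("RET_d" ++ PySem.Int.toStr k, expr)])
    []

-- ===== PORT B =====
def build_forward_label_exprs_py_alt (forward_n : Int) : List (String × String) :=
  let refs : List String :=
    "$close" :: (PySem.List.pyRange 1 (forward_n + 1) 1).map
      (fun i => "Ref($close, -" ++ PySem.Int.toStr i ++ ")")
  (PySem.List.enumerate (refs.zip (PySem.List.slice refs (some 1) none)) 1).map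
    (fun p => ("RET_d" ++ PySem.Int.toStr p.1, p.2.2 ++ "/" ++ p.2.1 ++ " - 1"))

-- ===== PRECONDITION & SPEC =====
def Spec_build_forward_label_exprs_py (forward_n : Int) (out : List (String × String)) : Prop := out = build_forward_label_exprs_py_alt forward_n
instance (forward_n : Int) (out : List (String × String)) : Decidable (Spec_build_forward_label_exprs_py forward_n out) := by unfold Spec_build_forward_label_exprs_py; infer_instance

-- ===== CLAIM (what is proved, stated in full; the proofs are below) =====
def Claim_equal_build_forward_label_exprs_py : Prop := ∀ (forward_n : Int), Dom_build_forward_label_exprs_py forward_n → Spec_build_forward_label_exprs_py forward_n (build_forward_label_exprs_py forward_n)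

-- ===== LEMMAS AND PROOFS =====

-- the i-th close reference string refs[i] (i ≥ 1)
def pvRef (i : Int) : String := "Ref($close, -" ++ PySem.Int.toStr i ++ ")"

-- the common shape both ports reduce to
def pvLabel (p : String) (a k : Int) : String × String :=
  ("RET_d" ++ PySem.Int.toStr k, pvRef k ++ "/" ++ (if k = a then p else pvRef (k - 1)) ++ " - 1")

lemma pvExpr_merge (k : Int) :
    pvRef k ++ "/" ++ pvRef (k - 1) ++ " - 1"
      = "Ref($close, -" ++ PySem.Int.toStr k ++ ")/Ref($close, -" ++ PySem.Int.toStr (k - 1) ++ ") - 1" := by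
  unfold pvRef
  simp only [String.append_assoc]
  congr 2

lemma pvA_eq (n : Int) :
    build_forward_label_exprs_py n
      = (PySem.List.pyRange 1 (n + 1) 1).map (pvLabel "$close" 1) := by
  unfold build_forward_label_exprs_py
  rw [PySem.List.foldl_append_singleton_eq_map
      (fun k => ("RET_d" ++ PySem.Int.toStr k,
        if k == 1 then "Ref($close, -1)/$close - 1"
        else "Ref($close, -" ++ PySem.Int.toStr k ++ ")/Ref($close, -" ++ PySem.Int.toStr (k - 1) ++ ") - 1"))]
  rw [List.nil_append]
  apply List.map_congr_left
  intro k _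
  by_cases hk : k = 1
  · subst hk; decide
  · simp only [pvLabel, beq_iff_eq, hk, if_false, pvExpr_merge]

lemma pvCore (m : Nat) : ∀ (a : Int) (p : String),
    (PySem.List.enumerate
        ((p :: (PySem.List.pyRange a (a + (m : Int)) 1).map pvRef).zip
          ((PySem.List.pyRange a (a + (m : Int)) 1).map pvRef)) a).map
      (fun q => ("RET_d" ++ PySem.Int.toStr q.1, q.2.2 ++ "/" ++ q.2.1 ++ " - 1"))
    = (PySem.List.pyRange a (a + (m : Int)) 1).map (pvLabel p a) := by
  induction m with
  | zero =>
      intro a p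
      rw [PySem.List.pyRange_one_eq_nil (by omega)]
      simp
  | succ m ih =>
      intro a p
      rw [PySem.List.pyRange_one_cons (by push_cast; omega)]
      simp only [List.map_cons, List.zip_cons_cons, PySem.List.enumerate_cons, List.map_cons]
      congr 1
      · simp [pvLabel]
      · rw [show a + ((m + 1 : Nat) : Int) = (a + 1) + (m : Int) from by push_cast; ring,
            ih (a + 1) (pvRef a)]
        apply List.map_congr_left
        intro k hk
        have hk' : a + 1 ≤ k := (PySem.List.mem_pyRange_one.mp hk).1
        unfold pvLabel
        by_cases h1 : k = a + 1
        · subst h1; simp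
        · simp [h1, show k ≠ a by omega]

lemma pvB_eq (n : Int) :
    build_forward_label_exprs_py_alt n
      = (PySem.List.pyRange 1 (n + 1) 1).map (pvLabel "$close" 1) := by
  simp only [build_forward_label_exprs_py_alt, PySem.List.slice_from_one, List.tail_cons]
  by_cases hn : n ≤ 0
  · rw [PySem.List.pyRange_one_eq_nil (by omega)]
    simp
  · obtain ⟨m, hm⟩ : ∃ m : Nat, n = (m : Int) := ⟨n.toNat, by omega⟩
    subst hm
    rw [show ((m : Int) + 1) = 1 + (m : Int) from by ring]
    exact pvCore m 1 "$close"

-- ===== VERDICT (by name: the statement is the Claim_ definition above) =====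
theorem build_forward_label_exprs_py_spec : Claim_equal_build_forward_label_exprs_py := by
  intro n _
  unfold Spec_build_forward_label_exprs_py
  rw [pvA_eq, pvB_eq]
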